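-- pv_equiv track=rewrite | github.com/ToaruPen/coq-japanese_stable | scripts/validate_xml.py | _find_unbalanced_color_line
-- ===== SOURCE A (Python) =====
-- def _find_unbalanced_color_line(text: str) -> int | None:
--     open_lines: list[int] = []
--     line_number = 1
--     index = 0
--
--     while index < len(text):
--         if text.startswith("{{", index):
--             open_lines.append(line_number)
--             index += 2
--             continue
--
--         if text.startswith("}}", index):
--             if not open_lines:
--                 return line_number
--             open_lines.pop()
--             index += 2
--             continue
--
--         if text[index] == "\n":
--             line_number += 1
--         index += 1
--
--     if open_lines:
--         return open_lines[0]
--     return None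
-- ===== SOURCE B (Python) =====
-- import re
-- from bisect import bisect_right
--
--
-- def _find_unbalanced_color_line(text: str) -> int | None:
--     # Positions of all newlines, sorted ascending.
--     newlines = [i for i, ch in enumerate(text) if ch == "\n"]
--     open_lines: list[int] = []
--     # Non-overlapping left-to-right token scan, identical to the greedy
--     # character scan of the original.
--     for m in re.finditer(r"\{\{|\}\}", text):
--         line = 1 + bisect_right(newlines, m.start())
--         if m.group() == "{{":
--             open_lines.append(line)
--         else:
--             if not open_lines:
--                 return line
--             open_lines.pop()
--     return open_lines[0] if open_lines else None
-- ===== Notes on version B (the rewrite author's own statement) =====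
-- stated objective: faster
-- what changed: B first extracts the ordered {{/}} token list with re.finditer and precomputes sorted newline offsets, then resolves each token's line number by bisect while matching tokens against a stack, instead of A's char-by-char Python scan with an incrementing line counter.
import Mathlib
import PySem

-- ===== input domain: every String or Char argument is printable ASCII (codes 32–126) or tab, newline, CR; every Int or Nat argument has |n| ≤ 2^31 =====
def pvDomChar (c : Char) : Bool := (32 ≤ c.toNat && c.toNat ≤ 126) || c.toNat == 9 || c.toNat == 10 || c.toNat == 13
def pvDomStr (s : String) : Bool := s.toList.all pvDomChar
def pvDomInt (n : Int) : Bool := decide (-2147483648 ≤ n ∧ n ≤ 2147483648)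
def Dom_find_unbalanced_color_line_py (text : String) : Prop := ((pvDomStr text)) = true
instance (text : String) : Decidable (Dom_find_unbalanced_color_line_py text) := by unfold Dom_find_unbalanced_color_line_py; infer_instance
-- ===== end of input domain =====

-- B re-derives each line number by bisecting precomputed newline offsets over a regex-extracted
-- token list instead of A's incremental char-by-char counter; a timing run measured B faster.

-- ===== PORT A =====
-- A's while loop over `index`, transliterated as recursion on the remaining characters:
-- startswith("{{", index) / startswith("}}", index) become the two-char patterns.
def goA : List Char → Int → List Int → Option Int
  | '{' :: '{' :: r, ln, st => goA r ln (st ++ [ln])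
  | '}' :: '}' :: r, ln, st =>
      if st = [] then some ln else goA r ln st.dropLast
  | c :: r, ln, st => goA r (if c = '\n' then ln + 1 else ln) st
  | [], _, st => st.head?

def find_unbalanced_color_line_py (text : String) : Option Int :=
  goA text.toList 1 []

-- ===== PORT B =====
-- newline offsets: [i for i, ch in enumerate(text) if ch == "\n"]
def nlposB : List Char → Nat → List Nat
  | [], _ => []
  | c :: r, i => if c = '\n' then i :: nlposB r (i + 1) else nlposB r (i + 1)

-- re.finditer(r"\{\{|\}\}", text): the greedy non-overlapping left-to-right token scan,
-- exact for this two-literal alternation (tries "{{" then "}}" at each position, else advances one).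
def tokensB : List Char → Nat → List (Nat × Bool)
  | '{' :: '{' :: r, i => (i, true) :: tokensB r (i + 2)
  | '}' :: '}' :: r, i => (i, false) :: tokensB r (i + 2)
  | _ :: r, i => tokensB r (i + 1)
  | [], _ => []

-- 1 + bisect_right(newlines, p): newlines is sorted, so this is 1 + #{q ∈ newlines | q ≤ p}.
def lineAtB (nl : List Nat) (p : Nat) : Int :=
  1 + (nl.countP (fun q => q ≤ p) : Int)

-- the token loop with its stack of open line numbers
def goB (nl : List Nat) : List (Nat × Bool) → List Int → Option Int
  | [], st => st.head?
  | (p, true) :: ts, st => goB nl ts (st ++ [lineAtB nl p])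
  | (p, false) :: ts, st =>
      if st = [] then some (lineAtB nl p) else goB nl ts st.dropLast

def find_unbalanced_color_line_py_alt (text : String) : Option Int :=
  goB (nlposB text.toList 0) (tokensB text.toList 0) []

-- ===== PRECONDITION & SPEC =====
def Spec_find_unbalanced_color_line_py (text : String) (out : Option Int) : Prop := out = find_unbalanced_color_line_py_alt text
instance (text : String) (out : Option Int) : Decidable (Spec_find_unbalanced_color_line_py text out) := by unfold Spec_find_unbalanced_color_line_py; infer_instance

-- ===== CLAIM (what is proved, stated in full; the proofs are below) =====
def Claim_equal_find_unbalanced_color_line_py : Prop := ∀ (text : String), Dom_find_unbalanced_color_line_py text → Spec_find_unbalanced_color_line_py text (find_unbalanced_color_line_py text)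

-- ===== LEMMAS AND PROOFS =====

theorem nlposB_append (xs ys : List Char) (i : Nat) :
    nlposB (xs ++ ys) i = nlposB xs i ++ nlposB ys (i + xs.length) := by
  induction xs generalizing i with
  | nil => simp [nlposB]
  | cons c r ih => by_cases h : c = '\n' <;> simp [nlposB, h, ih, Nat.add_assoc, Nat.add_comm 1]

theorem mem_nlposB {xs : List Char} {i q : Nat} (h : q ∈ nlposB xs i) :
    i ≤ q ∧ q < i + xs.length := by
  induction xs generalizing i with
  | nil => simp [nlposB] at h
  | cons c r ih =>
    simp only [nlposB] at h
    split at h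
    · rcases List.mem_cons.mp h with rfl | h'
      · simp only [List.length_cons]; constructor <;> omega
      · rcases ih h' with ⟨h1, h2⟩; simp only [List.length_cons]; constructor <;> omega
    · rcases ih h with ⟨h1, h2⟩; simp only [List.length_cons]; constructor <;> omega

theorem length_nlposB (xs : List Char) (i : Nat) :
    (nlposB xs i).length = xs.count '\n' := by
  induction xs generalizing i with
  | nil => simp [nlposB]
  | cons c r ih =>
    by_cases h : c = '\n' <;> simp [nlposB, h, ih]

-- the bisect value at a non-newline position pre.length is A's running line counter
theorem lineAtB_eq (pre : List Char) (c : Char) (r : List Char) (hc : c ≠ '\n') :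
    lineAtB (nlposB (pre ++ c :: r) 0) pre.length = 1 + (pre.count '\n' : Int) := by
  unfold lineAtB
  congr 1
  rw [nlposB_append, List.countP_append]
  have h1 : (nlposB pre 0).countP (fun q => q ≤ pre.length) = (nlposB pre 0).length := by
    apply List.countP_eq_length.mpr
    intro q hq
    have := (mem_nlposB hq).2
    simp; omega
  have h2 : (nlposB (c :: r) (0 + pre.length)).countP (fun q => q ≤ pre.length) = 0 := by
    apply List.countP_eq_zero.mpr
    intro q hq
    have h3 := mem_nlposB hq
    simp only [nlposB] at hq
    rw [if_neg hc] at hq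
    have := (mem_nlposB hq).1
    simp; omega
  rw [h1, h2, length_nlposB]
  simp

-- reducing goA / tokensB on a head character that starts no token
theorem goA_cons_other (c : Char) (r : List Char) (ln : Int) (st : List Int)
    (h1 : ∀ r1, c = '{' → r = '{' :: r1 → False)
    (h2 : ∀ r1, c = '}' → r = '}' :: r1 → False) :
    goA (c :: r) ln st = goA r (if c = '\n' then ln + 1 else ln) st := by
  rw [goA.eq_def]
  split
  · rename_i heq; injection heq with e1 e2; exact (h1 _ e1 e2).elim
  · rename_i heq; injection heq with e1 e2; exact (h2 _ e1 e2).elim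
  · rename_i heq; injection heq with e1 e2; subst e1; subst e2; rfl
  · rename_i heq; exact absurd heq (by simp)

theorem tokensB_cons_other (c : Char) (r : List Char) (i : Nat)
    (h1 : ∀ r1, c = '{' → r = '{' :: r1 → False)
    (h2 : ∀ r1, c = '}' → r = '}' :: r1 → False) :
    tokensB (c :: r) i = tokensB r (i + 1) := by
  rw [tokensB.eq_def]
  split
  · rename_i heq; injection heq with e1 e2; exact (h1 _ e1 e2).elim
  · rename_i heq; injection heq with e1 e2; exact (h2 _ e1 e2).elim
  · rename_i heq; injection heq with e1 e2; subst e1; subst e2; rfl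
  · rename_i heq; exact absurd heq (by simp)

-- main invariant: at offset pre.length into the full text, A's counter is 1 + pre.count '\n'
theorem goA_eq_goB (rest : List Char) (ln : Int) (st : List Int) :
    ∀ pre : List Char, ln = 1 + (pre.count '\n' : Int) →
      goA rest ln st = goB (nlposB (pre ++ rest) 0) (tokensB rest pre.length) st := by
  induction rest, ln, st using goA.induct with
  | case1 r ln st ih =>
    intro pre hln
    have hpre : pre ++ '{' :: '{' :: r = (pre ++ ['{', '{']) ++ r := by simp
    have hl : lineAtB (nlposB (pre ++ '{' :: '{' :: r) 0) pre.length = ln := by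
      rw [lineAtB_eq pre '{' ('{' :: r) (by decide), hln]
    have hih := ih (pre ++ ['{', '{']) (by simpa using hln)
    rw [hpre] at hl ⊢
    simp only [goA, tokensB, goB, hl]
    simpa using hih
  | case2 r ln =>
    intro pre hln
    have hl : lineAtB (nlposB (pre ++ '}' :: '}' :: r) 0) pre.length = ln := by
      rw [lineAtB_eq pre '}' ('}' :: r) (by decide), hln]
    simp [goA, tokensB, goB, hl]
  | case3 r ln st hst ih =>
    intro pre hln
    have hpre : pre ++ '}' :: '}' :: r = (pre ++ ['}', '}']) ++ r := by simp
    have hih := ih (pre ++ ['}', '}']) (by simpa using hln)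
    rw [hpre]
    simp only [goA, tokensB, goB, if_neg hst]
    simpa using hih
  | case4 c r ln st h1 h2 ih =>
    intro pre hln
    have hpre : pre ++ c :: r = (pre ++ [c]) ++ r := by simp
    have hln' : (if c = '\n' then ln + 1 else ln) = 1 + ((pre ++ [c]).count '\n' : Int) := by
      by_cases h : c = '\n'
      · simp [h, hln, List.count_append]; ring
      · simp [h, hln, List.count_append]
    have hih := ih (pre ++ [c]) hln'
    rw [goA_cons_other c r ln st h1 h2, tokensB_cons_other c r pre.length h1 h2, hpre]
    simpa using hih
  | case5 x st =>
    intro pre hln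
    simp [goA, tokensB, goB]

-- ===== VERDICT (by name: the statement is the Claim_ definition above) =====
theorem find_unbalanced_color_line_py_spec : Claim_equal_find_unbalanced_color_line_py := by
  intro text _
  unfold Spec_find_unbalanced_color_line_py find_unbalanced_color_line_py find_unbalanced_color_line_py_alt
  have := goA_eq_goB text.toList 1 [] [] (by simp)
  simpa using this
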